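-- pv_equiv track=rewrite | github.com/BernardoSGouveia/Matriz-ED | Interpretador.py | check_matriz
-- ===== SOURCE A (Python) =====
-- def check_matriz(M):
--     """Testa se a matriz é válida e classifica seu tipo."""
--     lin = len(M)
--     col = len(M[0])
--     cont_ts = 0
--     cont_ti = 0
--     cont_d = 0
--     for i in range(lin):
--         if len(M[i]) != col:
--             raise ValueError("Todas as linhas devem ter o mesmo número de colunas.")
--         for j in range(col):
--             if not isinstance(M[i][j], (int, float)):
--                 raise TypeError("Todos os elementos da matriz devem ser números.")
--             if M[i][j] != 0:
--                 if i < j: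
--                     cont_ts += 1
--                 elif i > j:
--                     cont_ti += 1
--                 else:
--                     cont_d += 1
--     if lin == col:
--         if cont_ts == 0 and cont_ti == 0:
--             return "Matriz diagonal"
--         elif cont_ts == 0:
--             return "Matriz triangular superior"
--         elif cont_ti == 0:
--             return "Matriz triangular inferior"
--         else:
--             return "Matriz quadrada"
--     return "Matriz retangular"
-- ===== SOURCE B (Python) =====
-- def check_matriz(M):
--     """Testa se a matriz é válida e classifica seu tipo."""
--     lin = len(M)
--     col = len(M[0])
--     for row in M:
--         if len(row) != col:
--             raise ValueError("Todas as linhas devem ter o mesmo número de colunas.")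
--         for x in row:
--             if not isinstance(x, (int, float)):
--                 raise TypeError("Todos os elementos da matriz devem ser números.")
--     if lin != col:
--         return "Matriz retangular"
--     up, lo = _tri(M)
--     if not up and not lo:
--         return "Matriz diagonal"
--     if not up:
--         return "Matriz triangular superior"
--     if not lo:
--         return "Matriz triangular inferior"
--     return "Matriz quadrada"
--
--
-- def _tri(M):
--     """Recursive border peel: (any nonzero strictly above diag?, strictly below?)."""
--     if not M:
--         return (False, False)
--     first, rest = M[0], M[1:]
--     up = any(x != 0 for x in first[1:])
--     lo = any(row[0] != 0 for row in rest)
--     u2, l2 = _tri([row[1:] for row in rest])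
--     return (up or u2, lo or l2)
-- ===== Notes on version B (the rewrite author's own statement) =====
-- stated objective: alternative
-- what changed: Replaces A's row-major triple-counter scan with a validation pass plus a recursive border-peeling classifier: _tri peels the first row and first column off the matrix, tests them directly, and recurses on the minor, so classification is structural recursion on the matrix instead of index loops with counters.
import Mathlib
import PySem

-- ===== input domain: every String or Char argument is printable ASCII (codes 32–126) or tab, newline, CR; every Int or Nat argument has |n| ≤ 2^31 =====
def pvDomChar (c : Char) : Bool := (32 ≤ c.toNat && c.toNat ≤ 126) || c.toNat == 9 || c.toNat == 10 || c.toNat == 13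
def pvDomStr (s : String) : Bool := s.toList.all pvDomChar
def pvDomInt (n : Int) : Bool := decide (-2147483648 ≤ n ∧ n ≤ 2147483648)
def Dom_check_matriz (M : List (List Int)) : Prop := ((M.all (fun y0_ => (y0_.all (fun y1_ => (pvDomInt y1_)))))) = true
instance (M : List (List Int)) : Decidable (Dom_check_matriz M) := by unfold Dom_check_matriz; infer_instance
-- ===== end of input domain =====

-- B classifies by a recursive border peel (_tri strips the first row and column and
-- recurses on the minor) instead of A's index loops with three counters (objective: alternative).

-- ===== PORT A =====
def check_matriz (M : List (List Int)) : String :=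
  let lin : Int := (M.length : Int)
  let col : Int := ((PySem.List.pyGetD M 0 []).length : Int)   -- len(M[0]); M ≠ [] by Pre_
  let c := (PySem.List.pyRange 0 lin 1).foldl (fun (c : Int × Int × Int) i =>
      let row := PySem.List.pyGetD M i []
      (PySem.List.pyRange 0 col 1).foldl (fun (c : Int × Int × Int) j =>
          if PySem.List.pyGetD row j 0 ≠ 0 then
            if i < j then (c.1 + 1, c.2.1, c.2.2)
            else if i > j then (c.1, c.2.1 + 1, c.2.2)
            else (c.1, c.2.1, c.2.2 + 1)
          else c) c)
    ((0 : Int), (0 : Int), (0 : Int))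
  -- the ValueError / TypeError branches raise; those inputs are excluded by Pre_
  if lin = col then
    if c.1 = 0 ∧ c.2.1 = 0 then "Matriz diagonal"
    else if c.1 = 0 then "Matriz triangular superior"
    else if c.2.1 = 0 then "Matriz triangular inferior"
    else "Matriz quadrada"
  else "Matriz retangular"

-- ===== PORT B =====
-- _tri: recursive border peel.  row[0] (headD) is only reached on rows that are
-- nonempty whenever the function is called under Pre_ (square matrix), where it is exact.
def pvTri : List (List Int) → Bool × Bool
  | [] => (false, false)
  | first :: rest =>
    let up := (first.drop 1).any (fun x => x != 0)
    let lo := rest.any (fun row => row.headD 0 != 0)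
    let p := pvTri (rest.map (fun row => row.drop 1))
    (up || p.1, lo || p.2)
termination_by M => M.length
decreasing_by simp

def check_matriz_alt (M : List (List Int)) : String :=
  let lin : Int := (M.length : Int)
  let col : Int := ((M.headD []).length : Int)   -- len(M[0]); M ≠ [] by Pre_
  -- the validation loop only raises (excluded by Pre_); it computes nothing
  if lin ≠ col then "Matriz retangular"
  else
    let p := pvTri M
    if p.1 = false ∧ p.2 = false then "Matriz diagonal"
    else if p.1 = false then "Matriz triangular superior"
    else if p.2 = false then "Matriz triangular inferior"
    else "Matriz quadrada"

-- ===== PRECONDITION & SPEC =====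
-- Pre_ excludes exactly the inputs where Python A raises: the empty list (IndexError
-- on M[0]) and ragged matrices (ValueError).  B raises at the same inputs.
def Pre_check_matriz (M : List (List Int)) : Prop :=
  M ≠ [] ∧ ∀ r ∈ M, r.length = (M.headD []).length
instance (M : List (List Int)) : Decidable (Pre_check_matriz M) := by unfold Pre_check_matriz; infer_instance
def pvWitness_check_matriz : List (List Int) := [[1, 0], [0, 2]]

def Spec_check_matriz (M : List (List Int)) (out : String) : Prop := out = check_matriz_alt M
instance (M : List (List Int)) (out : String) : Decidable (Spec_check_matriz M out) := by unfold Spec_check_matriz; infer_instance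

-- ===== CLAIM (what is proved, stated in full; the proofs are below) =====
def Claim_equal_check_matriz : Prop := ∀ (M : List (List Int)), Dom_check_matriz M → Pre_check_matriz M → Spec_check_matriz M (check_matriz M)

-- ===== LEMMAS AND PROOFS =====

-- the inner counting loop of A counts the nonzero entries of each region
theorem pv_inner_counts (e : Int → Int) (i : Int) (js : List Int) (c : Int × Int × Int) :
    js.foldl (fun (c : Int × Int × Int) j =>
        if e j ≠ 0 then
          if i < j then (c.1 + 1, c.2.1, c.2.2)
          else if i > j then (c.1, c.2.1 + 1, c.2.2)
          else (c.1, c.2.1, c.2.2 + 1)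
        else c) c
    = (c.1 + (js.countP fun j => decide (e j ≠ 0 ∧ i < j)),
       c.2.1 + (js.countP fun j => decide (e j ≠ 0 ∧ j < i)),
       c.2.2 + (js.countP fun j => decide (e j ≠ 0 ∧ i = j))) := by
  induction js generalizing c with
  | nil => simp
  | cons j js ih =>
    simp only [List.foldl_cons, List.countP_cons, ih]
    by_cases h0 : e j = 0
    · simp [h0]
    · rcases lt_trichotomy i j with h | h | h
      · refine Prod.ext ?_ (Prod.ext ?_ ?_) <;>
          simp [h0, h, not_lt_of_gt h, ne_of_lt h]; omega
      · refine Prod.ext ?_ (Prod.ext ?_ ?_) <;>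
          simp [h0, h]; omega
      · refine Prod.ext ?_ (Prod.ext ?_ ?_) <;>
          simp [h0, h, not_lt_of_gt h, ne_of_gt h]; omega

-- the outer loop adds up the per-row counts
theorem pv_outer_sum (f g h : Int → Nat) (is : List Int) (c : Int × Int × Int) :
    is.foldl (fun (c : Int × Int × Int) i =>
        (c.1 + (f i : Int), c.2.1 + (g i : Int), c.2.2 + (h i : Int))) c
    = (c.1 + ((is.map f).sum : Int), c.2.1 + ((is.map g).sum : Int),
       c.2.2 + ((is.map h).sum : Int)) := by
  induction is generalizing c with
  | nil => simp
  | cons i is ih =>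
    simp only [List.foldl_cons, List.map_cons, List.sum_cons, ih]
    refine Prod.ext ?_ (Prod.ext ?_ ?_) <;> simp <;> ring

-- any p over a list, rephrased through total getD indexing (p must reject the default)
theorem pv_any_iff_getD {α : Type} (l : List α) (d : α) (p : α → Bool) (hd : p d = false) :
    l.any p = true ↔ ∃ k : ℕ, p (l.getD k d) = true := by
  rw [List.any_eq_true]
  constructor
  · rintro ⟨x, hx, hpx⟩
    obtain ⟨k, hk, rfl⟩ := List.mem_iff_getElem.mp hx
    exact ⟨k, by rwa [List.getD_eq_getElem l d hk]⟩
  · rintro ⟨k, hk⟩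
    by_cases hlt : k < l.length
    · exact ⟨l[k], List.getElem_mem hlt, by rwa [List.getD_eq_getElem l d hlt] at hk⟩
    · rw [List.getD_eq_default l d (le_of_not_gt hlt)] at hk
      exact absurd hk (by simp [hd])

theorem pv_getD_drop {α : Type} (l : List α) (d : α) (k : ℕ) :
    (l.drop 1).getD k d = l.getD (k + 1) d := by
  simp [List.getD_eq_getElem?_getD]


theorem pv_getD_map_drop (rest : List (List Int)) (i : ℕ) :
    (rest.map (fun row => row.drop 1)).getD i [] = (rest.getD i []).drop 1 := by
  by_cases h : i < rest.length
  · rw [List.getD_eq_getElem _ _ (by simpa using h), List.getD_eq_getElem _ _ h,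
      List.getElem_map]
  · rw [List.getD_eq_default _ _ (by simpa using le_of_not_gt h),
      List.getD_eq_default _ _ (le_of_not_gt h)]
    rfl

theorem pv_headD_getD {α : Type} (l : List α) (d : α) : l.headD d = l.getD 0 d := by
  cases l <;> rfl

theorem pvTri_cons (first : List Int) (rest : List (List Int)) :
    pvTri (first :: rest)
      = ((first.drop 1).any (fun x => x != 0) || (pvTri (rest.map (fun row => row.drop 1))).1,
         rest.any (fun row => row.headD 0 != 0) || (pvTri (rest.map (fun row => row.drop 1))).2) := by
  rw [pvTri]

-- characterization of the border peel, first component: a nonzero strictly above the diagonal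
theorem pvTri_fst_aux (n : ℕ) : ∀ (M : List (List Int)), M.length ≤ n →
    ((pvTri M).1 = true ↔ ∃ i j : ℕ, i < j ∧ (M.getD i []).getD j 0 ≠ 0) := by
  induction n with
  | zero =>
    intro M hM
    rw [List.length_eq_zero_iff.mp (Nat.le_zero.mp hM)]
    simp [pvTri]
  | succ n ihn =>
    intro M hM
    match M with
    | [] => simp [pvTri]
    | first :: rest =>
    have ih := ihn (rest.map (fun row => row.drop 1)) (by simpa using Nat.lt_succ_iff.mp (by simpa using hM))
    rw [pvTri_cons]
    simp only [Bool.or_eq_true, ih]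
    constructor
    · rintro (hup | ⟨i, j, hij, hne⟩)
      · obtain ⟨k, hk⟩ := (pv_any_iff_getD _ 0 _ (by simp)).mp hup
        rw [pv_getD_drop] at hk
        exact ⟨0, k + 1, by omega, by simpa using hk⟩
      · rw [pv_getD_map_drop, pv_getD_drop] at hne
        exact ⟨i + 1, j + 1, by omega, by simpa using hne⟩
    · rintro ⟨i, j, hij, hne⟩
      cases i with
      | zero =>
        obtain ⟨k, rfl⟩ : ∃ k, j = k + 1 := ⟨j - 1, by omega⟩
        refine Or.inl ((pv_any_iff_getD _ 0 _ (by simp)).mpr ⟨k, ?_⟩)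
        rw [pv_getD_drop]
        simpa using hne
      | succ i' =>
        obtain ⟨k, rfl⟩ : ∃ k, j = k + 1 := ⟨j - 1, by omega⟩
        refine Or.inr ⟨i', k, by omega, ?_⟩
        rw [pv_getD_map_drop, pv_getD_drop]
        simpa using hne

theorem pvTri_fst (M : List (List Int)) :
    (pvTri M).1 = true ↔ ∃ i j : ℕ, i < j ∧ (M.getD i []).getD j 0 ≠ 0 :=
  pvTri_fst_aux M.length M le_rfl

-- characterization of the border peel, second component: a nonzero strictly below the diagonal
theorem pvTri_snd_aux (n : ℕ) : ∀ (M : List (List Int)), M.length ≤ n →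
    ((pvTri M).2 = true ↔ ∃ i j : ℕ, j < i ∧ (M.getD i []).getD j 0 ≠ 0) := by
  induction n with
  | zero =>
    intro M hM
    rw [List.length_eq_zero_iff.mp (Nat.le_zero.mp hM)]
    simp [pvTri]
  | succ n ihn =>
    intro M hM
    match M with
    | [] => simp [pvTri]
    | first :: rest =>
    have ih := ihn (rest.map (fun row => row.drop 1)) (by simpa using Nat.lt_succ_iff.mp (by simpa using hM))
    rw [pvTri_cons]
    simp only [Bool.or_eq_true, ih]
    constructor
    · rintro (hlo | ⟨i, j, hij, hne⟩)
      · obtain ⟨k, hk⟩ := (pv_any_iff_getD _ ([] : List Int) _ (by simp)).mp hlo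
        rw [pv_headD_getD] at hk
        exact ⟨k + 1, 0, by omega, by simpa using hk⟩
      · rw [pv_getD_map_drop, pv_getD_drop] at hne
        exact ⟨i + 1, j + 1, by omega, by simpa using hne⟩
    · rintro ⟨i, j, hij, hne⟩
      cases i with
      | zero => omega
      | succ i' =>
        cases j with
        | zero =>
          refine Or.inl ((pv_any_iff_getD _ ([] : List Int) _ (by simp)).mpr ⟨i', ?_⟩)
          rw [pv_headD_getD]
          simpa using hne
        | succ k =>
          refine Or.inr ⟨i', k, by omega, ?_⟩
          rw [pv_getD_map_drop, pv_getD_drop]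
          simpa using hne

theorem pvTri_snd (M : List (List Int)) :
    (pvTri M).2 = true ↔ ∃ i j : ℕ, j < i ∧ (M.getD i []).getD j 0 ≠ 0 :=
  pvTri_snd_aux M.length M le_rfl

-- under Pre_, the Int-range ∀ over A's scan region coincides with the unbounded Nat ∃
theorem pv_region (M : List (List Int)) (hrows : ∀ r ∈ M, r.length = (M.getD 0 []).length)
    (Q : Int → Int → Prop) :
    (∀ i ∈ PySem.List.pyRange 0 (M.length : Int) 1,
      ∀ j ∈ PySem.List.pyRange 0 ((M.getD 0 []).length : Int) 1,
        ¬((PySem.List.pyGetD (PySem.List.pyGetD M i []) j 0 ≠ 0) ∧ Q i j))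
    ↔ ¬ ∃ i j : ℕ, Q (i : Int) (j : Int) ∧ (M.getD i []).getD j 0 ≠ 0 := by
  constructor
  · rintro h ⟨i, j, hP, hne⟩
    have hi : i < M.length := by
      by_contra hge
      rw [List.getD_eq_default _ _ (le_of_not_gt hge)] at hne
      simp at hne
    have hj : j < (M.getD 0 []).length := by
      by_contra hge
      rw [List.getD_eq_default _ _ ?_] at hne
      · simp at hne
      · rw [List.getD_eq_getElem _ _ hi]
        rw [hrows _ (List.getElem_mem hi)]
        exact le_of_not_gt hge
    refine h (i : Int) ?_ (j : Int) ?_ ⟨?_, hP⟩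
    · rw [PySem.List.mem_pyRange_one]; exact ⟨by positivity, by exact_mod_cast hi⟩
    · rw [PySem.List.mem_pyRange_one]; exact ⟨by positivity, by exact_mod_cast hj⟩
    · rw [PySem.List.pyGetD_natCast, PySem.List.pyGetD_natCast]; exact hne
  · intro h i hi j hj hc
    obtain ⟨hne, hP⟩ := hc
    have h0i : 0 ≤ i := (PySem.List.mem_pyRange_one.mp hi).1
    have h0j : 0 ≤ j := (PySem.List.mem_pyRange_one.mp hj).1
    refine h ⟨i.toNat, j.toNat, ?_, ?_⟩
    · rwa [show ((i.toNat : ℕ) : Int) = i by omega, show ((j.toNat : ℕ) : Int) = j by omega]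
    · rw [show i = (i.toNat : Int) by omega, show j = (j.toNat : Int) by omega,
        PySem.List.pyGetD_natCast, PySem.List.pyGetD_natCast] at hne
      exact hne

theorem pv_main (M : List (List Int)) (hpre : Pre_check_matriz M) :
    check_matriz M = check_matriz_alt M := by
  obtain ⟨hne, hrows⟩ := hpre
  rw [pv_headD_getD] at hrows
  unfold check_matriz check_matriz_alt
  simp only [pv_inner_counts, pv_outer_sum, zero_add, PySem.List.pyGetD_zero, pv_headD_getD]
  set lin : Int := (M.length : Int) with hlin
  set col : Int := ((M.getD 0 []).length : Int) with hcol
  have sum_iff : ∀ (Q : Int → Int → Prop) [∀ i j : Int, Decidable (Q i j)],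
      ((((PySem.List.pyRange 0 lin 1).map fun i =>
        (PySem.List.pyRange 0 col 1).countP fun j =>
          decide (PySem.List.pyGetD (PySem.List.pyGetD M i []) j 0 ≠ 0 ∧ Q i j)).sum : Int) = 0
      ↔ ¬ ∃ i j : ℕ, Q (i : Int) (j : Int) ∧ (M.getD i []).getD j 0 ≠ 0) := by
    intro Q _
    rw [Int.natCast_eq_zero, List.sum_eq_zero_iff]
    rw [← pv_region M hrows Q]
    constructor
    · intro h i hi j hj
      have := h _ (List.mem_map_of_mem hi)
      rw [List.countP_eq_zero] at this
      simpa using this j hj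
    · intro h n hn
      obtain ⟨i, hi, rfl⟩ := List.mem_map.mp hn
      rw [List.countP_eq_zero]
      intro j hj
      simpa using h i hi j hj
  have hU : ((((PySem.List.pyRange 0 lin 1).map fun i =>
        (PySem.List.pyRange 0 col 1).countP fun j =>
          decide (PySem.List.pyGetD (PySem.List.pyGetD M i []) j 0 ≠ 0 ∧ i < j)).sum : Int) = 0)
      ↔ (pvTri M).1 = false := by
    rw [sum_iff (fun i j => i < j), ← Bool.not_eq_true, pvTri_fst]
    exact not_congr (by
      constructor
      · rintro ⟨i, j, hij, h⟩; exact ⟨i, j, by exact_mod_cast hij, h⟩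
      · rintro ⟨i, j, hij, h⟩; exact ⟨i, j, by exact_mod_cast hij, h⟩)
  have hL : ((((PySem.List.pyRange 0 lin 1).map fun i =>
        (PySem.List.pyRange 0 col 1).countP fun j =>
          decide (PySem.List.pyGetD (PySem.List.pyGetD M i []) j 0 ≠ 0 ∧ j < i)).sum : Int) = 0)
      ↔ (pvTri M).2 = false := by
    rw [sum_iff (fun i j => j < i), ← Bool.not_eq_true, pvTri_snd]
    exact not_congr (by
      constructor
      · rintro ⟨i, j, hij, h⟩; exact ⟨i, j, by exact_mod_cast hij, h⟩
      · rintro ⟨i, j, hij, h⟩; exact ⟨i, j, by exact_mod_cast hij, h⟩)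
  by_cases hlc : lin = col
  · rw [if_pos hlc, if_neg (show ¬lin ≠ col from fun h => h hlc)]
    by_cases hu : ((((PySem.List.pyRange 0 lin 1).map fun i =>
        (PySem.List.pyRange 0 col 1).countP fun j =>
          decide (PySem.List.pyGetD (PySem.List.pyGetD M i []) j 0 ≠ 0 ∧ i < j)).sum : Int) = 0) <;>
      by_cases hl : ((((PySem.List.pyRange 0 lin 1).map fun i =>
        (PySem.List.pyRange 0 col 1).countP fun j =>
          decide (PySem.List.pyGetD (PySem.List.pyGetD M i []) j 0 ≠ 0 ∧ j < i)).sum : Int) = 0)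
    · rw [if_pos ⟨hu, hl⟩, if_pos ⟨hU.mp hu, hL.mp hl⟩]
    · rw [if_neg (fun h => hl h.2), if_pos hu,
        if_neg (fun h => hl (hL.mpr h.2)), if_pos (hU.mp hu)]
    · rw [if_neg (fun h => hu h.1), if_neg hu, if_pos hl,
        if_neg (fun h => hu (hU.mpr h.1)), if_neg (fun h => hu (hU.mpr h)), if_pos (hL.mp hl)]
    · rw [if_neg (fun h => hu h.1), if_neg hu, if_neg hl,
        if_neg (fun h => hu (hU.mpr h.1)), if_neg (fun h => hu (hU.mpr h)),
        if_neg (fun h => hl (hL.mpr h))]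
  · rw [if_neg hlc, if_pos hlc]

-- ===== VERDICT (by name: the statement is the Claim_ definition above) =====
theorem check_matriz_spec : Claim_equal_check_matriz := by
  intro M _ hpre
  exact pv_main M hpre
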